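-- pv_equiv track=rewrite | github.com/bakkim05/IA_Proyecto_4 | Code/main.py | selec_indi
-- ===== SOURCE A (Python) =====
-- def selec_indi(cantidad, poblacion, errores):
--     mejores_indi = []
--     mejores_err = []
--
--     temporal = errores[0]
--     posicion = 0
--
--     i = 0
--     j = 0
--
--     while i < cantidad:
--         temporal = errores[0]
--         posicion = 0
--         for j in range(len(poblacion)):
--             if errores[j] < temporal:
--                 temporal = errores[j]
--                 posicion = j
--         mejores_indi.append(poblacion.pop(posicion))
--         mejores_err.append(errores.pop(posicion))
--         i += 1
--
--     return mejores_indi, mejores_err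
-- ===== SOURCE B (Python) =====
-- def selec_indi(cantidad, poblacion, errores):
--     # Sort the population indices by their error (stable: ties keep the earlier
--     # index first, matching repeated first-minimum extraction), keep the best
--     # `cantidad`, then remove exactly those individuals from the input lists.
--     if cantidad <= 0:
--         return [], []  # nothing to select
--     order = sorted(range(len(poblacion)), key=lambda i: errores[i])[:cantidad]
--     mejores_indi = [poblacion[i] for i in order]
--     mejores_err = [errores[i] for i in order]
--     for i in sorted(order, reverse=True):
--         del poblacion[i]
--         del errores[i]
--     return mejores_indi, mejores_err
-- ===== Notes on version B (the rewrite author's own statement) =====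
-- stated objective: faster
-- what changed: A repeatedly rescans the whole list for the current minimum error and pops it (cantidad linear scans with list pops); B sorts the population indices once by error (stable, so ties keep the earliest index, matching A's first-minimum rule), slices off the best cantidad, and deletes those indices from the inputs.
import Mathlib
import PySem

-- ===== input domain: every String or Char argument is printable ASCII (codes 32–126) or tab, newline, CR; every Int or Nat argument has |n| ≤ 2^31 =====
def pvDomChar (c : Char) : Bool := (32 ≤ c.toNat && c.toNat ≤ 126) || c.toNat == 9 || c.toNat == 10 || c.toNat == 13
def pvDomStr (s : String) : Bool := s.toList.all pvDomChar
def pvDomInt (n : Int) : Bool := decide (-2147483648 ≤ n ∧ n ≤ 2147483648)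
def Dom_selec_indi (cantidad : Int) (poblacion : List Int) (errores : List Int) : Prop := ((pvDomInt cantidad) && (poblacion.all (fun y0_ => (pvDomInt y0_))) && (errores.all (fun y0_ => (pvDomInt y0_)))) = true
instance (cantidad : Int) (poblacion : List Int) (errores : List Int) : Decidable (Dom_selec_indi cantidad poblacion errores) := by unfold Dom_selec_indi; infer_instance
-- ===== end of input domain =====

-- B replaces A's repeated linear argmin-and-pop scans by one stable index sort plus a slice.
-- Both Pythons mutate `poblacion`/`errores` identically (they remove the selected individuals);
-- the ports and the equivalence proved here are about the RETURN value.

-- ===== PORT A =====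
-- the while-loop: fuel = number of remaining iterations (cantidad.toNat at the top)
def selecLoopA : Nat → List Int → List Int → List Int → List Int → List Int × List Int
  | 0, _, _, mi, me => (mi, me)
  | n+1, p, e, mi, me =>
    match e with
    | [] => (mi, me)  -- Python raises IndexError at `errores[0]` here; excluded by Pre_
    | e0 :: _ =>
      -- for j in range(len(poblacion)): track (temporal, posicion)
      let tp := (List.range p.length).foldl
        (fun (tp : Int × Nat) j => if e.getD j 0 < tp.1 then (e.getD j 0, j) else tp) (e0, 0)
      match PySem.List.pop? p (tp.2 : Int), PySem.List.pop? e (tp.2 : Int) with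
      | some (x, p'), some (y, e') => selecLoopA n p' e' (mi ++ [x]) (me ++ [y])
      | _, _ => (mi, me)  -- Python raises IndexError in `.pop`; excluded by Pre_

def selec_indi (cantidad : Int) (poblacion : List Int) (errores : List Int) : List Int × List Int :=
  match errores with
  | [] => ([], [])  -- Python raises IndexError at `temporal = errores[0]`; excluded by Pre_
  | _ => selecLoopA cantidad.toNat poblacion errores [] []

-- ===== PORT B =====
def selec_indi_alt (cantidad : Int) (poblacion : List Int) (errores : List Int) : List Int × List Int :=
  if cantidad ≤ 0 then ([], [])
  else
    -- order = sorted(range(len(poblacion)), key=lambda i: errores[i])[:cantidad]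
    -- (range(len(poblacion)) is the index list, ported as List.range; errores[i] has 0 ≤ i < len(errores) under Pre_, so getD is exact)
    let order := PySem.List.slice
      (PySem.List.sorted (List.range poblacion.length) (fun i => errores.getD i 0) false)
      none (some cantidad)
    (order.map (fun i => poblacion.getD i 0), order.map (fun i => errores.getD i 0))

-- ===== PRECONDITION & SPEC =====
-- Pre_ is exactly the set of inputs on which Python A returns normally: A reads errores[0]
-- before the loop (so errores ≠ []), and when cantidad > 0 it needs cantidad ≤ len(poblacion)
-- ≤ len(errores) (otherwise some errores[j] / .pop raises IndexError).
def Pre_selec_indi (cantidad : Int) (poblacion : List Int) (errores : List Int) : Prop :=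
  errores ≠ [] ∧ (cantidad ≤ 0 ∨ (cantidad ≤ (poblacion.length : Int) ∧ poblacion.length ≤ errores.length))
instance (cantidad : Int) (poblacion : List Int) (errores : List Int) : Decidable (Pre_selec_indi cantidad poblacion errores) := by unfold Pre_selec_indi; infer_instance
def pvWitness_selec_indi : Int × List Int × List Int := (2, [10, 20, 30], [5, 1, 5])

def Spec_selec_indi (cantidad : Int) (poblacion : List Int) (errores : List Int) (out : List Int × List Int) : Prop := out = selec_indi_alt cantidad poblacion errores
instance (cantidad : Int) (poblacion : List Int) (errores : List Int) (out : List Int × List Int) : Decidable (Spec_selec_indi cantidad poblacion errores out) := by unfold Spec_selec_indi; infer_instance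

-- ===== CLAIM (what is proved, stated in full; the proofs are below) =====
def Claim_equal_selec_indi : Prop := ∀ (cantidad : Int) (poblacion : List Int) (errores : List Int), Dom_selec_indi cantidad poblacion errores → Pre_selec_indi cantidad poblacion errores → Spec_selec_indi cantidad poblacion errores (selec_indi cantidad poblacion errores)

-- ===== LEMMAS AND PROOFS =====

-- the argmin fold shared by A's inner scan and selAll: first position of the minimum
lemma argmin_fold (f : Nat → Int) (n : Nat) (hn : 0 < n) :
    ∃ pos : Nat,
      (List.range n).foldl (fun (tp : Int × Nat) j => if f j < tp.1 then (f j, j) else tp) (f 0, 0)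
        = (f pos, pos) ∧
      pos < n ∧ (∀ j < n, f pos ≤ f j) ∧ (∀ j < pos, f pos < f j) := by
  induction n with
  | zero => omega
  | succ m ih =>
    rcases Nat.eq_zero_or_pos m with hm | hm
    · subst hm
      refine ⟨0, ?_, by omega, ?_, by omega⟩
      · simp
      · intro j hj
        have hj0 : j = 0 := by omega
        subst hj0; exact le_refl _
    · obtain ⟨pos, hEq, hlt, hmin, hfirst⟩ := ih hm
      rw [List.range_succ, List.foldl_append, hEq, List.foldl_cons, List.foldl_nil]
      by_cases hc : f m < f pos
      · refine ⟨m, by simp [hc], by omega, ?_, ?_⟩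
        · intro j hj
          rcases Nat.lt_or_ge j m with hjm | hjm
          · have := hmin j hjm; omega
          · have hjm' : j = m := by omega
            subst hjm'; exact le_refl _
        · intro j hj
          rcases Nat.lt_or_ge j pos with hjr | hjr
          · have := hfirst j hjr; omega
          · have := hmin j (by omega); omega
      · refine ⟨pos, by simp [hc], by omega, ?_, hfirst⟩
        intro j hj
        rcases Nat.lt_or_ge j m with hjm | hjm
        · exact hmin j hjm
        · have hjm' : j = m := by omega
          subst hjm'; omega

lemma headD_eq_getD {α : Type} (xs : List α) (d : α) (h : xs ≠ []) : xs.headD d = xs.getD 0 d := by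
  cases xs with
  | nil => exact absurd rfl h
  | cons a t => rfl

-- the fold A's inner scan performs, on the index list xs with a fixed key
def fmPos (key : Nat → Int) (xs : List Nat) : Nat :=
  ((List.range xs.length).foldl
    (fun (tp : Int × Nat) j => if key (xs.getD j 0) < tp.1 then (key (xs.getD j 0), j) else tp)
    (key (xs.headD 0), 0)).2

lemma fmPos_spec (key : Nat → Int) (xs : List Nat) (h : xs ≠ []) :
    (List.range xs.length).foldl
        (fun (tp : Int × Nat) j => if key (xs.getD j 0) < tp.1 then (key (xs.getD j 0), j) else tp)
        (key (xs.headD 0), 0)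
      = (key (xs.getD (fmPos key xs) 0), fmPos key xs) ∧
    fmPos key xs < xs.length ∧
    (∀ j < xs.length, key (xs.getD (fmPos key xs) 0) ≤ key (xs.getD j 0)) ∧
    (∀ j < fmPos key xs, key (xs.getD (fmPos key xs) 0) < key (xs.getD j 0)) := by
  have hn : 0 < xs.length := List.length_pos_iff.mpr h
  obtain ⟨pos, hEq, hlt, hmin, hfirst⟩ := argmin_fold (fun j => key (xs.getD j 0)) xs.length hn

  rw [headD_eq_getD xs 0 h]
  have hp : fmPos key xs = pos := by
    unfold fmPos; rw [headD_eq_getD xs 0 h, hEq]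
  rw [hp, hEq]
  exact ⟨rfl, hlt, hmin, hfirst⟩

lemma fmPos_lt (key : Nat → Int) (xs : List Nat) (h : xs ≠ []) : fmPos key xs < xs.length :=
  (fmPos_spec key xs h).2.1

-- repeated first-argmin extraction over a list of (original) indices; key is fixed
def selAll (key : Nat → Int) (xs : List Nat) : List Nat :=
  if h : xs = [] then []
  else xs.getD (fmPos key xs) 0 :: selAll key (xs.eraseIdx (fmPos key xs))
  termination_by xs.length
  decreasing_by
    have hlt : fmPos key xs < xs.length := fmPos_lt key xs h
    rw [List.length_eraseIdx, if_pos hlt]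
    omega

lemma selAll_nil (key : Nat → Int) : selAll key [] = [] := by
  rw [selAll.eq_def]; simp

lemma selAll_cons (key : Nat → Int) (xs : List Nat) (h : xs ≠ []) :
    selAll key xs = xs.getD (fmPos key xs) 0 :: selAll key (xs.eraseIdx (fmPos key xs)) := by
  rw [selAll.eq_def]; rw [dif_neg h]

lemma selAll_perm (key : Nat → Int) (xs : List Nat) : (selAll key xs).Perm xs := by
  induction hn : xs.length using Nat.strong_induction_on generalizing xs with
  | _ n ih =>
    subst hn
    by_cases h : xs = []
    · subst h; simp [selAll_nil]
    · rw [selAll_cons key xs h]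
      have hlt : fmPos key xs < xs.length := fmPos_lt key xs h
      have hlen : (xs.eraseIdx (fmPos key xs)).length < xs.length := by
        rw [List.length_eraseIdx, if_pos hlt]; omega
      have hperm := ih _ hlen (xs.eraseIdx (fmPos key xs)) rfl
      have h2 : (xs.getD (fmPos key xs) 0 :: xs.eraseIdx (fmPos key xs)).Perm xs := by
        rw [List.getD_eq_getElem xs 0 hlt]
        exact List.getElem_cons_eraseIdx_perm hlt
      exact (List.Perm.cons _ hperm).trans h2

lemma selAll_pairwise (key : Nat → Int) (xs : List Nat) (hps : xs.Pairwise (· < ·)) :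
    (selAll key xs).Pairwise
      (fun a b => (toLex (key a, a) : Lex (Int × Nat)) < toLex (key b, b)) := by
  induction hn : xs.length using Nat.strong_induction_on generalizing xs with
  | _ n ih =>
    subst hn
    by_cases h : xs = []
    · subst h; simp [selAll_nil]
    · rw [selAll_cons key xs h]
      obtain ⟨_, hlt, hmin, hfirst⟩ := fmPos_spec key xs h
      have hlen : (xs.eraseIdx (fmPos key xs)).length < xs.length := by
        rw [List.length_eraseIdx, if_pos hlt]; omega
      constructor
      · intro y hy
        have hy' : y ∈ xs.eraseIdx (fmPos key xs) := (selAll_perm key _).subset hy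
        obtain ⟨j, hj, hjne, hjy⟩ := List.mem_eraseIdx_iff_getElem.mp hy'
        rw [List.getD_eq_getElem xs 0 hlt, ← hjy, Prod.Lex.toLex_lt_toLex]
        have hle := hmin j hj
        rw [List.getD_eq_getElem xs 0 hlt, List.getD_eq_getElem xs 0 hj] at hle
        rcases lt_or_eq_of_le hle with hltk | heqk
        · exact Or.inl hltk
        · refine Or.inr ⟨heqk, ?_⟩
          have hposj : fmPos key xs < j := by
            rcases Nat.lt_or_ge j (fmPos key xs) with hjp | hjp
            · exfalso
              have := hfirst j hjp
              rw [List.getD_eq_getElem xs 0 hlt, List.getD_eq_getElem xs 0 hj] at this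
              omega
            · omega
          exact (List.pairwise_iff_getElem.mp hps) _ j hlt hj hposj
      · exact ih _ hlen _ (List.Pairwise.sublist (List.eraseIdx_sublist xs _) hps) rfl

lemma insertBy_congr {α : Type} (b1 b2 : α → α → Bool) (x : α) (acc : List α)
    (h : ∀ y ∈ acc, b1 x y = b2 x y) :
    PySem.List.insertBy b1 x acc = PySem.List.insertBy b2 x acc := by
  induction acc with
  | nil => rfl
  | cons y ys ih =>
    have hy := h y (by simp)
    simp only [PySem.List.insertBy]
    rw [← hy]
    by_cases hb : b1 x y = true
    · simp [hb]
    · simp only [Bool.not_eq_true] at hb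
      simp [hb]
      exact ih (fun z hz => h z (by simp [hz]))

lemma foldl_insertBy_congr (key : Nat → Int) (xs : List Nat) (acc : List Nat)
    (hps : xs.Pairwise (· < ·)) (hacc : ∀ y ∈ acc, ∀ x ∈ xs, y < x) :
    xs.foldl (fun a x => PySem.List.insertBy (fun a b => decide (key a < key b)) x a) acc
      = xs.foldl (fun a x => PySem.List.insertBy
          (fun a b => decide ((toLex (key a, a) : Lex (Int × Nat)) < toLex (key b, b))) x a) acc := by
  induction xs generalizing acc with
  | nil => rfl
  | cons x t ih =>
    simp only [List.foldl_cons]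
    have hsame : PySem.List.insertBy (fun a b => decide (key a < key b)) x acc
        = PySem.List.insertBy
            (fun a b => decide ((toLex (key a, a) : Lex (Int × Nat)) < toLex (key b, b))) x acc := by
      apply insertBy_congr
      intro y hy
      have hyx : y < x := hacc y hy x (by simp)
      simp only [decide_eq_decide, Prod.Lex.toLex_lt_toLex]
      constructor
      · intro hlt; exact Or.inl hlt
      · rintro (hlt | ⟨_, hxy⟩)
        · exact hlt
        · omega
    rw [hsame]
    apply ih
    · exact (List.pairwise_cons.mp hps).2
    · intro y hy x' hx'
      rcases (PySem.List.mem_insertBy _ x y acc).mp hy with rfl | hy'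
      · exact (List.pairwise_cons.mp hps).1 x' hx'
      · exact hacc y hy' x' (by simp [hx'])

lemma sorted_eq_selAll (key : Nat → Int) (xs : List Nat) (hps : xs.Pairwise (· < ·)) :
    PySem.List.sorted xs key false = selAll key xs := by
  have h1 : PySem.List.sorted xs key false
      = PySem.List.sorted xs (fun i => (toLex (key i, i) : Lex (Int × Nat))) false := by
    rw [PySem.List.sorted_eq_foldl_insertBy, PySem.List.sorted_eq_foldl_insertBy]
    exact foldl_insertBy_congr key xs [] hps (by simp)
  rw [h1]
  exact PySem.List.sorted_eq_of_perm_of_pairwise_lt xs (selAll key xs) _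
    (selAll_perm key xs) (selAll_pairwise key xs hps)

lemma getD_map_append (xs : List Nat) (g : Nat → Int) (t : List Int) (j : Nat)
    (hj : j < xs.length) : ((xs.map g) ++ t).getD j 0 = g (xs.getD j 0) := by
  rw [List.getD_eq_getElem _ 0 (by simp; omega), List.getD_eq_getElem _ 0 hj]
  rw [List.getElem_append_left (by simpa using hj)]
  simp

lemma pop?_nat {α : Type} (xs : List α) (i : Nat) (h : i < xs.length) :
    PySem.List.pop? xs (i : Int) = some (xs[i], xs.eraseIdx i) := by
  simp [PySem.List.pop?, PySem.List.pyIdx?, h]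

lemma loopA_inv (pob err : List Int) (k : Nat) (idxs : List Nat) (tail mi me : List Int)
    (hk : k ≤ idxs.length) :
    selecLoopA k (idxs.map (fun i => pob.getD i 0)) (idxs.map (fun i => err.getD i 0) ++ tail) mi me
      = (mi ++ ((selAll (fun i => err.getD i 0) idxs).take k).map (fun i => pob.getD i 0),
         me ++ ((selAll (fun i => err.getD i 0) idxs).take k).map (fun i => err.getD i 0)) := by
  induction k generalizing idxs mi me with
  | zero => simp [selecLoopA]
  | succ n ih =>
    cases idxs with
    | nil => simp at hk
    | cons i0 rest =>
      have hne : (i0 :: rest : List Nat) ≠ [] := by simp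
      have hpos : fmPos (fun i => err.getD i 0) (i0 :: rest) < (i0 :: rest).length :=
        fmPos_lt _ _ hne
      have hfold : (List.range ((i0 :: rest).map (fun i => pob.getD i 0)).length).foldl
          (fun (tp : Int × Nat) j =>
            if ((i0 :: rest).map (fun i => err.getD i 0) ++ tail).getD j 0 < tp.1
            then (((i0 :: rest).map (fun i => err.getD i 0) ++ tail).getD j 0, j) else tp)
          (err.getD i0 0, 0)
          = ((fun i => err.getD i 0) ((i0 :: rest).getD (fmPos (fun i => err.getD i 0) (i0 :: rest)) 0),
             fmPos (fun i => err.getD i 0) (i0 :: rest)) := by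
        rw [List.length_map]
        rw [PySem.List.foldl_congr_mem _ _
          (fun (tp : Int × Nat) j =>
            if (fun i => err.getD i 0) ((i0 :: rest).getD j 0) < tp.1
            then ((fun i => err.getD i 0) ((i0 :: rest).getD j 0), j) else tp) _ ?_]
        · exact (fmPos_spec (fun i => err.getD i 0) (i0 :: rest) hne).1
        · intro acc j hj
          have hjlt : j < (i0 :: rest).length := List.mem_range.mp hj
          rw [getD_map_append _ _ _ _ hjlt]
      have hpopP : PySem.List.pop? ((i0 :: rest).map (fun i => pob.getD i 0))
            ((fmPos (fun i => err.getD i 0) (i0 :: rest) : Nat) : Int)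
          = some ((fun i => pob.getD i 0) ((i0 :: rest)[fmPos (fun i => err.getD i 0) (i0 :: rest)]),
              ((i0 :: rest).eraseIdx (fmPos (fun i => err.getD i 0) (i0 :: rest))).map
                (fun i => pob.getD i 0)) := by
        rw [pop?_nat _ _ (by rw [List.length_map]; exact hpos), List.eraseIdx_map,
          List.getElem_map]
      have hpopE : PySem.List.pop? ((i0 :: rest).map (fun i => err.getD i 0) ++ tail)
            ((fmPos (fun i => err.getD i 0) (i0 :: rest) : Nat) : Int)
          = some ((fun i => err.getD i 0) ((i0 :: rest)[fmPos (fun i => err.getD i 0) (i0 :: rest)]),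
              ((i0 :: rest).eraseIdx (fmPos (fun i => err.getD i 0) (i0 :: rest))).map
                (fun i => err.getD i 0) ++ tail) := by
        rw [pop?_nat _ _ (by rw [List.length_append, List.length_map]; omega)]
        rw [List.eraseIdx_append_of_lt_length (by rw [List.length_map]; exact hpos)]
        rw [List.getElem_append_left (by rw [List.length_map]; exact hpos)]
        rw [List.eraseIdx_map, List.getElem_map]
      have hk' : n ≤ ((i0 :: rest).eraseIdx (fmPos (fun i => err.getD i 0) (i0 :: rest))).length := by
        rw [List.length_eraseIdx, if_pos hpos]
        simp only [List.length_cons] at hk ⊢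
        omega
      have hPcons : (i0 :: rest).map (fun i => pob.getD i 0)
          = pob.getD i0 0 :: rest.map (fun i => pob.getD i 0) := by simp
      have hEcons : (i0 :: rest).map (fun i => err.getD i 0) ++ tail
          = err.getD i0 0 :: (rest.map (fun i => err.getD i 0) ++ tail) := by simp
      rw [hPcons] at hfold hpopP ⊢
      rw [hEcons] at hfold hpopE ⊢
      simp only [selecLoopA]
      rw [hfold]
      dsimp only
      rw [hpopP, hpopE]
      dsimp only
      rw [ih _ _ _ hk']
      rw [selAll_cons _ _ hne]
      simp only [List.take_succ_cons, List.map_cons]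
      rw [List.getD_eq_getElem _ 0 hpos]
      simp [List.append_assoc]

lemma map_getD_range (l : List Int) (P : Nat) (h : P ≤ l.length) :
    (List.range P).map (fun i => l.getD i 0) = l.take P := by
  apply List.ext_getElem
  · simp [List.length_take]; omega
  · intro i h1 h2
    simp only [List.getElem_map, List.getElem_range, List.getElem_take]
    rw [List.getD_eq_getElem l 0 (by simp at h1; omega)]

-- ===== VERDICT (by name: the statement is the Claim_ definition above) =====
theorem selec_indi_spec : Claim_equal_selec_indi := by
  unfold Claim_equal_selec_indi
  intro c p e _ hpre
  unfold Spec_selec_indi selec_indi selec_indi_alt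
  obtain ⟨he, hd⟩ := hpre
  by_cases hc : c ≤ 0
  · have h0 : c.toNat = 0 := by omega
    rw [if_pos hc]
    cases e with
    | nil => exact absurd rfl he
    | cons e0 et => simp [h0, selecLoopA]
  · rw [if_neg hc]
    have hcp : c ≤ (p.length : Int) := by
      rcases hd with h | ⟨h, _⟩
      · omega
      · exact h
    have hpe : p.length ≤ e.length := by
      rcases hd with h | ⟨_, h⟩
      · omega
      · exact h
    cases e with
    | nil => exact absurd rfl he
    | cons e0 et =>
      have hp' : (List.range p.length).map (fun i => p.getD i 0) = p := by
        rw [map_getD_range p p.length le_rfl, List.take_length]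
      have hEe : (List.range p.length).map (fun i => (e0 :: et).getD i 0)
            ++ (e0 :: et).drop p.length = (e0 :: et) := by
        rw [map_getD_range _ p.length hpe, List.take_append_drop]
      have hA := loopA_inv p (e0 :: et) c.toNat (List.range p.length)
        ((e0 :: et).drop p.length) [] [] (by simp; omega)
      rw [hp', hEe] at hA
      rw [hA]
      rw [PySem.List.slice_to _ (by omega)]
      rw [sorted_eq_selAll _ _ List.pairwise_lt_range]
      simp
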